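-- pv_equiv track=rewrite | github.com/tanuki-create/datascience | leetcode/easy/016_plus_one/solution.py | multiply_by_two
-- ===== SOURCE A (Python) =====
-- def multiply_by_two(digits):
--     """
--     Multiply the large integer by 2 (bonus problem).
--
--     Args:
--         digits: Array of digits representing a large integer
--
--     Returns:
--         list: Array of digits after multiplying by 2
--     """
--     result = []
--     carry = 0
--
--     for i in range(len(digits) - 1, -1, -1):
--         total = digits[i] * 2 + carry
--         result.append(total % 10)
--         carry = total // 10
--
--     if carry > 0:
--         result.append(carry)
--
--     return result[::-1]
-- ===== SOURCE B (Python) =====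
-- def multiply_by_two(digits):
--     """
--     Multiply the large integer (array of digits) by 2.
--
--     Convert the array to a single integer (Horner), double it, split off the
--     overflow with one divmod, and read the remainder back as a fixed-width
--     digit array, prepending the overflow when positive.
--     """
--     v = 0
--     for d in digits:
--         v = 10 * v + d
--     v *= 2
--     n = len(digits)
--     carry, rem = divmod(v, 10 ** n)
--     out = []
--     for _ in range(n):
--         rem, m = divmod(rem, 10)
--         out.append(m)
--     out.reverse()
--     return [carry] + out if carry > 0 else out
-- ===== Notes on version B (the rewrite author's own statement) =====
-- stated objective: alternative
-- what changed: Replaces the right-to-left per-digit carry loop with append-and-final-reverse by converting the whole array to one integer with Horner's rule, doubling it once, splitting off the overflow with a single divmod by 10^n, and peeling the remainder back into a fixed-width digit array (exact for arbitrary int entries under Python floor division), prepending the overflow when positive.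
import Mathlib
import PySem

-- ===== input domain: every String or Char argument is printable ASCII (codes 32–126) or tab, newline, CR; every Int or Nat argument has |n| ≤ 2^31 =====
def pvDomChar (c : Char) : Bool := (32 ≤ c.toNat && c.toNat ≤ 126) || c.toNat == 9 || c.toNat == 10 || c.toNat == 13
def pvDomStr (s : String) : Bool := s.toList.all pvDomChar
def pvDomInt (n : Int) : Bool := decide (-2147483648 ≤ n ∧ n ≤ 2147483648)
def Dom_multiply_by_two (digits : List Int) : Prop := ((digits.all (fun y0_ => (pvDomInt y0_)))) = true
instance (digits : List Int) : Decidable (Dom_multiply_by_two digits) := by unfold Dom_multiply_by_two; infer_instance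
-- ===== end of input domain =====

-- B replaces the right-to-left per-digit carry loop (+ final reverse) by Horner-converting
-- the array to one integer, doubling it, and reading fixed-width digits back arithmetically;
-- objective: alternative (different algorithm, no speed claim).


-- ===== PORT A =====
def multiply_by_two (digits : List Int) : List Int :=
  -- result = []; carry = 0; for i in range(len(digits)-1, -1, -1): …
  let st := (PySem.List.pyRange ((digits.length : Int) - 1) (-1) (-1)).foldl
    (fun (st : List Int × Int) (i : Int) =>
      -- total = digits[i] * 2 + carry (the index is always in range here)
      (st.1 ++ [PySem.Int.mod (PySem.List.pyGetD digits i 0 * 2 + st.2) 10],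
       PySem.Int.floordiv (PySem.List.pyGetD digits i 0 * 2 + st.2) 10))
    ([], 0)
  let result := if st.2 > 0 then st.1 ++ [st.2] else st.1
  -- return result[::-1]
  (PySem.List.slice? result none none (-1)).getD []

-- ===== PORT B =====
def multiply_by_two_alt (digits : List Int) : List Int :=
  -- v = 0; for d in digits: v = 10 * v + d;  v *= 2
  let v := 2 * digits.foldl (fun v d => 10 * v + d) 0
  let n := digits.length
  -- carry, rem = divmod(v, 10 ** n): the divisor 10^n is a positive constant,
  -- so divmod is exactly the floordiv/mod pair
  let carry := PySem.Int.floordiv v (10 ^ n)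
  -- out = []; for _ in range(n): rem, m = divmod(rem, 10); out.append(m)
  let st := (PySem.List.pyRange 0 (n : Int) 1).foldl
    (fun (st : Int × List Int) _ =>
      (PySem.Int.floordiv st.1 10, st.2 ++ [PySem.Int.mod st.1 10]))
    (PySem.Int.mod v (10 ^ n), [])
  -- out.reverse()
  let out := st.2.reverse
  if carry > 0 then carry :: out else out

-- ===== PRECONDITION & SPEC =====
def Spec_multiply_by_two (digits : List Int) (out : List Int) : Prop := out = multiply_by_two_alt digits
instance (digits : List Int) (out : List Int) : Decidable (Spec_multiply_by_two digits out) := by unfold Spec_multiply_by_two; infer_instance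

-- ===== CLAIM (what is proved, stated in full; the proofs are below) =====
def Claim_equal_multiply_by_two : Prop := ∀ (digits : List Int), Dom_multiply_by_two digits → Spec_multiply_by_two digits (multiply_by_two digits)

-- ===== LEMMAS AND PROOFS =====

-- reference right-to-left recursion: (carry, digits of 2*xs in order)
def pvGo : List Int → Int × List Int
  | [] => (0, [])
  | d :: rest =>
    let p := pvGo rest
    let t := 2 * d + p.1
    (PySem.Int.floordiv t 10, PySem.Int.mod t 10 :: p.2)

-- Horner value of the digit array
def pvVal (xs : List Int) : Int := xs.foldl (fun v d => 10 * v + d) 0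

theorem pvVal_generalized (xs : List Int) : ∀ a : Int,
    xs.foldl (fun v d => 10 * v + d) a = a * 10 ^ xs.length + pvVal xs := by
  induction xs with
  | nil =>
    intro a
    simp only [List.foldl_nil, List.length_nil, pow_zero, pvVal]
    ring
  | cons e rest ih =>
    intro a
    rw [List.foldl_cons, ih, List.length_cons]
    have hv : pvVal (e :: rest) = e * 10 ^ rest.length + pvVal rest := by
      show (e :: rest).foldl (fun v d => 10 * v + d) 0 = _
      rw [List.foldl_cons, show (10 : Int) * 0 + e = e by ring, ih]
    rw [hv, pow_succ]
    ring

theorem pvVal_cons (d : Int) (rest : List Int) :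
    pvVal (d :: rest) = d * 10 ^ rest.length + pvVal rest := by
  show (d :: rest).foldl (fun v d => 10 * v + d) 0 = _
  simp only [List.foldl_cons]
  rw [pvVal_generalized]
  ring

-- A's loop, re-expressed as a fold over the reversed digit list
theorem pvFoldGo (xs : List Int) :
    xs.reverse.foldl
      (fun (st : List Int × Int) (d : Int) =>
        (st.1 ++ [PySem.Int.mod (d * 2 + st.2) 10], PySem.Int.floordiv (d * 2 + st.2) 10))
      ([], 0)
    = ((pvGo xs).2.reverse, (pvGo xs).1) := by
  induction xs with
  | nil => simp [pvGo]
  | cons d rest ih =>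
    simp only [List.reverse_cons, List.foldl_append, ih, List.foldl_cons, List.foldl_nil, pvGo]
    rw [mul_comm d 2]

-- A's port computes pvGo
theorem pvA_eq (digits : List Int) :
    multiply_by_two digits =
      (if (pvGo digits).1 > 0 then (pvGo digits).1 :: (pvGo digits).2 else (pvGo digits).2) := by
  unfold multiply_by_two
  have hidx : (PySem.List.pyRange ((digits.length : Int) - 1) (-1) (-1)).map
      (fun i => PySem.List.pyGetD digits i 0) = digits.reverse := by
    rw [show ((digits.length : Int) - 1) = (-1) + digits.length by ring,
        PySem.List.pyRange_neg_one_eq_reverse]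
    rw [show ((-1 : Int) + 1) = 0 by ring, show ((-1 : Int) + ↑digits.length + 1) = ↑digits.length by ring]
    rw [List.map_reverse, PySem.List.map_pyGetD_pyRange_zero']
  have hfold : (PySem.List.pyRange ((digits.length : Int) - 1) (-1) (-1)).foldl
      (fun (st : List Int × Int) (i : Int) =>
        (st.1 ++ [PySem.Int.mod (PySem.List.pyGetD digits i 0 * 2 + st.2) 10],
         PySem.Int.floordiv (PySem.List.pyGetD digits i 0 * 2 + st.2) 10))
      ([], 0) = ((pvGo digits).2.reverse, (pvGo digits).1) := by
    have hm : ((PySem.List.pyRange ((digits.length : Int) - 1) (-1) (-1)).map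
        (fun i => PySem.List.pyGetD digits i 0)).foldl
        (fun (st : List Int × Int) (d : Int) =>
          (st.1 ++ [PySem.Int.mod (d * 2 + st.2) 10], PySem.Int.floordiv (d * 2 + st.2) 10))
        ([], 0)
      = (PySem.List.pyRange ((digits.length : Int) - 1) (-1) (-1)).foldl
        (fun (st : List Int × Int) (i : Int) =>
          (st.1 ++ [PySem.Int.mod (PySem.List.pyGetD digits i 0 * 2 + st.2) 10],
           PySem.Int.floordiv (PySem.List.pyGetD digits i 0 * 2 + st.2) 10))
        ([], 0) := List.foldl_map
    rw [← hm, hidx, pvFoldGo]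
  simp only [hfold, PySem.List.slice?_none_none_neg_one, Option.getD_some]
  split_ifs with h <;> simp

-- pvGo, characterised by the doubled Horner value: the carry is v / 10^n and the
-- k-th output digit is v / 10^(n-1-k) % 10, where v = 2 * value(digits)
theorem pvGo_char (digits : List Int) :
    (pvGo digits).1 = (2 * pvVal digits) / 10 ^ digits.length ∧
    (pvGo digits).2 = (List.range digits.length).map
        (fun k => (2 * pvVal digits) / 10 ^ (digits.length - 1 - k) % 10) := by
  induction digits with
  | nil => simp [pvGo, pvVal]
  | cons d rest ih =>
    obtain ⟨ihc, ihl⟩ := ih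
    have hval : 2 * pvVal (d :: rest) = 2 * pvVal rest + 2 * d * 10 ^ rest.length := by
      rw [pvVal_cons]; ring
    have hten : ∀ m : Nat, (0:Int) < 10 ^ m := fun m => pow_pos (by norm_num) m
    -- t = 2*d + carry(rest) = v / 10^(len rest)
    have ht : 2 * d + (pvGo rest).1 = (2 * pvVal (d :: rest)) / 10 ^ rest.length := by
      rw [ihc, hval, Int.add_mul_ediv_right _ _ (ne_of_gt (hten rest.length))]
      ring
    constructor
    · -- carry: (v / 10^m) / 10 = v / 10^(m+1)
      show PySem.Int.floordiv (2 * d + (pvGo rest).1) 10 = _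
      rw [PySem.Int.floordiv_eq_ediv_of_pos (by norm_num), ht,
          Int.ediv_ediv_of_nonneg (le_of_lt (hten rest.length))]
      rw [List.length_cons, pow_succ]
    · -- digit list
      show PySem.Int.mod (2 * d + (pvGo rest).1) 10 :: (pvGo rest).2 = _
      rw [PySem.Int.mod_eq_emod_of_pos (by norm_num), ht, ihl,
          List.length_cons, List.range_succ_eq_map, List.map_cons, List.map_map]
      refine congrArg₂ List.cons (by simp) ?_
      refine List.map_congr_left fun k hk => ?_
      have hk' : k < rest.length := List.mem_range.mp hk
      simp only [Function.comp_apply]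
      rw [show rest.length + 1 - 1 - (k + 1) = rest.length - 1 - k from by omega]
      have hpow : (10:Int) ^ rest.length = 10 ^ (1 + k) * 10 ^ (rest.length - 1 - k) := by
        rw [← pow_add]; congr 1; omega
      -- 2*value(d::rest) and 2*value(rest) agree on all digit positions below rest.length
      have hlow : (2 * pvVal (d :: rest)) / 10 ^ (rest.length - 1 - k) % 10
           = (2 * pvVal rest) / 10 ^ (rest.length - 1 - k) % 10 := by
        have hnum : 2 * pvVal rest + 2 * d * (10 ^ (1 + k) * 10 ^ (rest.length - 1 - k))
             = 2 * pvVal rest + (2 * d * 10 ^ (1 + k)) * 10 ^ (rest.length - 1 - k) := by ring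
        rw [hval, hpow, hnum, Int.add_mul_ediv_right _ _ (ne_of_gt (hten (rest.length - 1 - k)))]
        rw [show 2 * d * 10 ^ (1 + k) = 10 * (2 * d * 10 ^ k) from by rw [pow_add, pow_one]; ring,
            Int.add_mul_emod_self_left]
      exact hlow.symm

-- B's extraction loop: peeling n low digits off r, appended in low-to-high order
theorem pvExtract (l : List Int) (r : Int) (acc : List Int) :
    (l.foldl (fun (st : Int × List Int) _ =>
        (PySem.Int.floordiv st.1 10, st.2 ++ [PySem.Int.mod st.1 10])) (r, acc)).2
    = acc ++ (List.range l.length).map (fun k => r / 10 ^ k % 10) := by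
  induction l generalizing r acc with
  | nil => simp
  | cons x l ih =>
    rw [List.foldl_cons, ih, List.length_cons, List.range_succ_eq_map, List.map_cons,
        List.map_map, PySem.Int.floordiv_eq_ediv_of_pos (by norm_num : (0:Int) < 10),
        PySem.Int.mod_eq_emod_of_pos (by norm_num : (0:Int) < 10)]
    simp only [List.append_assoc, List.singleton_append, pow_zero, Int.ediv_one]
    refine congrArg (acc ++ ·) (congrArg₂ List.cons rfl ?_)
    refine List.map_congr_left fun k _ => ?_
    show r / 10 / 10 ^ k % 10 = r / 10 ^ (k + 1) % 10
    rw [show (10:Int) ^ (k + 1) = 10 * 10 ^ k from by rw [pow_succ]; ring,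
        ← Int.ediv_ediv_of_nonneg (by norm_num : (0:Int) ≤ 10)]

theorem pvRevMap (n : Nat) (f : Nat → Int) :
    ((List.range n).map f).reverse = (List.range n).map (fun k => f (n - 1 - k)) := by
  apply List.ext_getElem
  · simp
  · intro i h1 h2
    simp only [List.length_reverse, List.length_map, List.length_range] at h1
    rw [List.getElem_reverse]
    simp only [List.getElem_map, List.getElem_range, List.length_map, List.length_range]

-- digits of v mod 10^n agree with digits of v below position n
theorem pvModDigit (v : Int) (n j : Nat) (h : j < n) :
    (PySem.Int.mod v (10 ^ n)) / 10 ^ j % 10 = v / 10 ^ j % 10 := by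
  have hten : ∀ m : Nat, (0:Int) < 10 ^ m := fun m => pow_pos (by norm_num) m
  obtain ⟨q, hq⟩ : ∃ q, v / 10 ^ n = q := ⟨_, rfl⟩
  have h1 : PySem.Int.mod v (10 ^ n) = v + (-q) * 10 ^ n := by
    rw [PySem.Int.mod_eq_emod_of_pos (hten n), Int.emod_def, hq]; ring
  rw [h1, show (10:Int) ^ n = 10 ^ (n - j) * 10 ^ j from by rw [← pow_add]; congr 1; omega,
      show v + -q * (10 ^ (n - j) * 10 ^ j) = v + (-q * 10 ^ (n - j)) * 10 ^ j from by ring,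
      Int.add_mul_ediv_right _ _ (ne_of_gt (hten j)),
      show -q * 10 ^ (n - j) = 10 * (-q * 10 ^ (n - j - 1)) from by
        obtain ⟨m, hm⟩ : ∃ m, n - j = m + 1 := ⟨n - j - 1, by omega⟩
        rw [hm]
        simp only [Nat.add_sub_cancel]
        rw [pow_succ]; ring,
      Int.add_mul_emod_self_left]

-- ===== VERDICT (by name: the statement is the Claim_ definition above) =====
theorem multiply_by_two_spec : Claim_equal_multiply_by_two := by
  intro digits _
  show multiply_by_two digits = multiply_by_two_alt digits
  obtain ⟨hc, hl⟩ := pvGo_char digits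
  rw [pvA_eq]
  unfold multiply_by_two_alt
  dsimp only
  have hten : ∀ m : Nat, (0:Int) < 10 ^ m := fun m => pow_pos (by norm_num) m
  have hlen : (PySem.List.pyRange 0 (digits.length : Int) 1).length = digits.length := by
    rw [PySem.List.length_pyRange_one]; omega
  have hout : ((PySem.List.pyRange 0 (digits.length : Int) 1).foldl
      (fun (st : Int × List Int) _ =>
        (PySem.Int.floordiv st.1 10, st.2 ++ [PySem.Int.mod st.1 10]))
      (PySem.Int.mod (2 * List.foldl (fun v d => 10 * v + d) 0 digits) (10 ^ digits.length), [])).2.reverse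
      = (List.range digits.length).map
        (fun k => (2 * pvVal digits) / 10 ^ (digits.length - 1 - k) % 10) := by
    rw [pvExtract, List.nil_append, hlen, pvRevMap]
    refine List.map_congr_left fun k hk => ?_
    have hk' : k < digits.length := List.mem_range.mp hk
    exact pvModDigit (2 * pvVal digits) digits.length (digits.length - 1 - k) (by omega)
  rw [hout, ← hl, PySem.Int.floordiv_eq_ediv_of_pos (hten digits.length)]
  have hpv : pvVal digits = List.foldl (fun v d => 10 * v + d) 0 digits := rfl
  rw [hpv] at hc
  rw [← hc]
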